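-- pv_equiv track=rewrite | github.com/Nordo80/Python | TK/tk1/exam.py | max_duplicate
-- ===== SOURCE A (Python) =====
-- def max_duplicate(nums):
--     """
--     Return the largest element which has at least one duplicate.
--
--     If no element has duplicate element (an element with the same value), return None.
--
--     max_duplicate([1, 2, 3]) => None
--     max_duplicate([1, 2, 2]) => 2
--     max_duplicate([1, 2, 2, 1, 1]) => 2
--
--     :param nums: List of integers
--     :return: Maximum element with duplicate. None if no duplicate found.
--     """
--     list_dublic = []
--     for number in nums:
--         if nums.count(number) > 1:
--             list_dublic.append(number)
--
--     if len(list_dublic) == 0: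
--         return None
--     else:
--         return max(list_dublic)
-- ===== SOURCE B (Python) =====
-- def max_duplicate(nums):
--     """One-pass re-implementation: track seen values and the best duplicate."""
--     seen = set()
--     best = None
--     for x in nums:
--         if x in seen:
--             if best is None or x > best:
--                 best = x
--         else:
--             seen.add(x)
--     return best
-- ===== Notes on version B (the rewrite author's own statement) =====
-- stated objective: faster
-- what changed: Replaced the quadratic per-element nums.count scan plus a final max() over all duplicate occurrences with a single pass that keeps a seen-set and updates a running maximum whenever a value is re-encountered.
import Mathlib
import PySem

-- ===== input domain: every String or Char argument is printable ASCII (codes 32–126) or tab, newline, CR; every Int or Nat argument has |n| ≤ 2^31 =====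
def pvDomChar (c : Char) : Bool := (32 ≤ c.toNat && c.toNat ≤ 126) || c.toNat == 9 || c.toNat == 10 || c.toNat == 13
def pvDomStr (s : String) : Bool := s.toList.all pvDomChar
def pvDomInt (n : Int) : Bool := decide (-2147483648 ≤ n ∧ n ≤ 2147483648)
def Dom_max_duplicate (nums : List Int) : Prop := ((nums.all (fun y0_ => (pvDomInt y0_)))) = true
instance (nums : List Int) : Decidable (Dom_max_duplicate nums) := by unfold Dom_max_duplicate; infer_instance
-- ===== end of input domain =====

-- B replaces A's quadratic per-element count scans with one linear pass over a seen-set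
-- that maintains the running maximum of re-encountered values (objective: faster).


-- ===== PORT A =====
def max_duplicate (nums : List Int) : Option Int :=
  let list_dublic := nums.foldl
    (fun acc number => if nums.count number > 1 then acc ++ [number] else acc) []
  if list_dublic.length = 0 then none
  else PySem.List.max? list_dublic (fun x => x)

-- ===== PORT B =====
-- loop body of B: state is (seen set, best-so-far)
def altStep (st : PySem.Set Int × Option Int) (x : Int) : PySem.Set Int × Option Int :=
  if PySem.Set.contains st.1 x then
    (st.1, some (match st.2 with | none => x | some m => if x > m then x else m))
  else
    (PySem.Set.add st.1 x, st.2)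

def max_duplicate_alt (nums : List Int) : Option Int :=
  (nums.foldl altStep (PySem.Set.empty, none)).2

-- ===== PRECONDITION & SPEC =====
def Spec_max_duplicate (nums : List Int) (out : Option Int) : Prop := out = max_duplicate_alt nums
instance (nums : List Int) (out : Option Int) : Decidable (Spec_max_duplicate nums out) := by unfold Spec_max_duplicate; infer_instance

-- ===== CLAIM (what is proved, stated in full; the proofs are below) =====
def Claim_equal_max_duplicate : Prop := ∀ (nums : List Int), Dom_max_duplicate nums → Spec_max_duplicate nums (max_duplicate nums)

-- ===== LEMMAS AND PROOFS =====

-- the option running-max update B performs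
def omax (b : Option Int) (x : Int) : Option Int :=
  some (match b with | none => x | some m => if x > m then x else m)

-- the sublist of elements that are re-encounters, given the already-seen set
def dups : List Int → PySem.Set Int → List Int
  | [], _ => []
  | x :: xs, s =>
      if PySem.Set.contains s x then x :: dups xs s
      else dups xs (PySem.Set.add s x)

theorem loop_snd (l : List Int) : ∀ (s : PySem.Set Int) (b : Option Int),
    (l.foldl altStep (s, b)).2 = (dups l s).foldl omax b := by
  induction l with
  | nil => intro s b; rfl
  | cons x xs ih =>
      intro s b
      simp only [List.foldl_cons, altStep, dups]
      by_cases h : x ∈ s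
      · simp [h, ih, omax]
      · simp [h, ih]

theorem omax_fold_some (l : List Int) : ∀ (m : Int),
    l.foldl omax (some m) = some (l.foldl max m) := by
  induction l with
  | nil => intro m; rfl
  | cons x xs ih =>
      intro m
      simp only [List.foldl_cons, omax, ih]
      rw [show (if x > m then x else m) = max m x by
        simp only [max_def]; split_ifs <;> omega]

theorem omax_fold_none (l : List Int) : l.foldl omax none = l.max? := by
  cases l with
  | nil => rfl
  | cons x xs => simp [omax, omax_fold_some, List.max?]

theorem mem_dups (l : List Int) : ∀ (s : PySem.Set Int) (m : Int),
    m ∈ dups l s ↔ m ∈ l ∧ (m ∈ s ∨ 2 ≤ l.count m) := by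
  induction l with
  | nil => intro s m; simp [dups]
  | cons x xs ih =>
      intro s m
      by_cases hx : x ∈ s
      · rw [show dups (x :: xs) s = x :: dups xs s by simp [dups, hx]]
        by_cases hmx : m = x
        · subst hmx; simp [hx]
        · have hxm : ¬ x = m := fun h => hmx h.symm
          simp [hmx, hxm, ih, List.mem_cons]
      · rw [show dups (x :: xs) s = dups xs (PySem.Set.add s x) by simp [dups, hx]]
        rw [ih]
        by_cases hmx : m = x
        · subst hmx
          simp [hx, List.mem_cons]
        · have hxm : ¬ x = m := fun h => hmx h.symm
          simp [PySem.Set.mem_add, hmx, hxm, List.mem_cons]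

theorem max?_congr (l₁ l₂ : List Int) (h : ∀ m, m ∈ l₁ ↔ m ∈ l₂) :
    l₁.max? = l₂.max? := by
  cases h₁ : l₁.max? with
  | none =>
      rw [List.max?_eq_none_iff] at h₁
      subst h₁
      cases h₂ : l₂.max? with
      | none => rfl
      | some a =>
          have := List.max?_mem h₂
          exact absurd ((h a).2 this) (List.not_mem_nil)
  | some a =>
      obtain ⟨hmem, hle⟩ := List.max?_eq_some_iff.1 h₁
      symm
      rw [List.max?_eq_some_iff]
      exact ⟨(h a).1 hmem, fun b hb => hle b ((h b).2 hb)⟩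

theorem pymax_eq_max? (l : List Int) (h : l ≠ []) :
    PySem.List.max? l (fun x => x) = l.max? := by
  cases l with
  | nil => simp at h
  | cons x xs => rw [PySem.List.max?_id_cons]; rfl

-- ===== VERDICT (by name: the statement is the Claim_ definition above) =====
theorem max_duplicate_spec : Claim_equal_max_duplicate := by
  intro nums _
  unfold Spec_max_duplicate max_duplicate_alt
  rw [loop_snd, omax_fold_none]
  simp only [max_duplicate, PySem.List.foldl_append_ite_eq_filter, List.nil_append]
  set F := nums.filter (fun number => decide (nums.count number > 1)) with hF
  have hmem : ∀ m, m ∈ F ↔ m ∈ dups nums PySem.Set.empty := by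
    intro m
    rw [hF, List.mem_filter, mem_dups]
    simp only [PySem.Set.empty, List.not_mem_nil, false_or, decide_eq_true_eq]
    exact and_congr_right (fun _ => by omega)
  by_cases hlen : F.length = 0
  · have hFnil : F = [] := List.length_eq_zero_iff.1 hlen
    simp only [hlen, if_true]
    symm
    rw [List.max?_eq_none_iff, List.eq_nil_iff_forall_not_mem]
    intro m hm
    exact (List.eq_nil_iff_forall_not_mem.1 hFnil) m ((hmem m).2 hm)
  · simp only [hlen, if_false]
    rw [pymax_eq_max? F (fun hn => hlen (by simp [hn]))]
    exact max?_congr F (dups nums PySem.Set.empty) hmem
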